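-- pv_equiv track=rewrite | github.com/stabworthy/BB_Weekly | matchup_generator.py | generate_swiss_pairings
-- ===== SOURCE A (Python) =====
-- from typing import List, Set, Tuple, Optional
--
-- def have_played(team1: str, team2: str, past_matchups: Set[Tuple[str, str]]) -> bool:
--     """
--     Check if two teams have played each other before.
--
--     Args:
--         team1: First team name
--         team2: Second team name
--         past_matchups: Set of past matchup tuples
--
--     Returns:
--         True if teams have played before, False otherwise
--     """
--     clean_team1 = team1.strip().replace('\t', ' ')
--     clean_team2 = team2.strip().replace('\t', ' ')
--     matchup = tuple(sorted([clean_team1, clean_team2]))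
--     return matchup in past_matchups
--
-- def _find_pairing_without_repeats(
--     teams: List[str],
--     past_matchups: Set[Tuple[str, str]],
--     unpaired_indices: List[int],
-- ) -> Optional[List[Tuple[str, str]]]:
--     """
--     Backtracking search: find a set of pairings for unpaired_indices with no repeats.
--     Pairs the highest-ranked (lowest index) unpaired team first, preferring
--     higher-ranked opponents when multiple valid choices exist.
--
--     Returns:
--         List of (team1, team2) pairs, or None if no valid pairing exists.
--     """
--     if not unpaired_indices:
--         return []
--     # Always pair the highest-ranked (smallest index) unpaired team first
--     i = unpaired_indices[0]
--     team1 = teams[i]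
--     # Try opponents in order of rank (prefer pairing high with high)
--     for j in unpaired_indices[1:]:
--         team2 = teams[j]
--         if have_played(team1, team2, past_matchups):
--             continue
--         rest_indices = [idx for idx in unpaired_indices if idx not in (i, j)]
--         rest_pairings = _find_pairing_without_repeats(teams, past_matchups, rest_indices)
--         if rest_pairings is not None:
--             return [(team1, team2)] + rest_pairings
--     return None
--
-- def generate_swiss_pairings(standings: List[dict], past_matchups: Set[Tuple[str, str]]) -> List[Tuple[Optional[str], Optional[str]]]:
--     """
--     Generate Swiss pairings for the next round with zero repeat matchups.
--
--     Pairs highest-ranked teams together when possible, using backtracking to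
--     ensure no pair has played before. If odd number of teams, lowest ranked
--     team gets a bye. If no valid pairing exists (e.g. some group has all
--     played each other), raises ValueError.
--
--     Args:
--         standings: List of team standings sorted by Rank (ascending)
--         past_matchups: Set of past matchup tuples
--
--     Returns:
--         List of tuples (team1, team2) for each matchup.
--         Bye weeks are represented as (team_name, None)
--
--     Raises:
--         ValueError: If no valid pairing exists without repeats
--     """
--     teams = [team['TeamName'].strip().replace('\t', ' ') for team in standings]
--     n = len(teams)
--
--     # Odd number: assign bye to lowest ranked, then pair the rest
--     if n % 2 == 1:
--         bye_team = teams[-1]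
--         indices_to_pair = list(range(n - 1))
--         pairings = _find_pairing_without_repeats(teams, past_matchups, indices_to_pair)
--         if pairings is None:
--             raise ValueError(
--                 "Cannot generate pairings with zero repeats: the remaining teams "
--                 "after assigning a bye have no valid matchups (all have already played each other). "
--                 f"Bye would be: {bye_team!r}. Consider manual adjustment or different bye assignment."
--             )
--         # Return matchups with bye first, then pairs (ordered by rank of first team)
--         return [(bye_team, None)] + pairings
--
--     # Even number: find a full pairing with no repeats
--     pairings = _find_pairing_without_repeats(teams, past_matchups, list(range(n)))
--     if pairings is None:
--         raise ValueError(
--             "Cannot generate pairings with zero repeats: no valid pairing exists. "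
--             "Some teams have all played each other (e.g. last 4 all played each other). "
--             "Consider manual pairing or adding a bye for one team."
--         )
--     return pairings
-- ===== SOURCE B (Python) =====
-- from typing import List, Set, Tuple, Optional
--
--
-- def have_played(team1: str, team2: str, past_matchups: Set[Tuple[str, str]]) -> bool:
--     clean_team1 = team1.strip().replace('\t', ' ')
--     clean_team2 = team2.strip().replace('\t', ' ')
--     matchup = tuple(sorted([clean_team1, clean_team2]))
--     return matchup in past_matchups
--
--
-- def generate_swiss_pairings(standings: List[dict], past_matchups: Set[Tuple[str, str]]) -> List[Tuple[Optional[str], Optional[str]]]: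
--     """Two-phase: first decide feasibility of every needed index set with a
--     memoized subset-feasibility oracle, then build the pairing greedily
--     (no backtracking): pair the best free team with its best oracle-approved
--     opponent."""
--     teams = [team['TeamName'].strip().replace('\t', ' ') for team in standings]
--     n = len(teams)
--     m = n - n % 2
--     memo = {}
--
--     def solvable(unpaired):
--         # Can this tuple of indices be completely paired without repeats?
--         if not unpaired:
--             return True
--         if unpaired in memo:
--             return memo[unpaired]
--         i, rest = unpaired[0], unpaired[1:]
--         result = False
--         for j in rest:
--             if not have_played(teams[i], teams[j], past_matchups) and \
--                solvable(tuple(k for k in rest if k != j)):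
--                 result = True
--                 break
--         memo[unpaired] = result
--         return result
--
--     if not solvable(tuple(range(m))):
--         if n % 2 == 1:
--             raise ValueError(
--                 "Cannot generate pairings with zero repeats: the remaining teams "
--                 "after assigning a bye have no valid matchups (all have already played each other). "
--                 f"Bye would be: {teams[-1]!r}. Consider manual adjustment or different bye assignment."
--             )
--         raise ValueError(
--             "Cannot generate pairings with zero repeats: no valid pairing exists. "
--             "Some teams have all played each other (e.g. last 4 all played each other). "
--             "Consider manual pairing or adding a bye for one team."
--         )
--
--     # Greedy reconstruction guided by the oracle: never backtracks.
--     pairs = []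
--     remaining = tuple(range(m))
--     while remaining:
--         i, rest = remaining[0], remaining[1:]
--         for j in rest:
--             if not have_played(teams[i], teams[j], past_matchups) and \
--                solvable(tuple(k for k in rest if k != j)):
--                 break
--         pairs.append((teams[i], teams[j]))
--         remaining = tuple(k for k in rest if k != j)
--
--     if n % 2 == 1:
--         return [(teams[-1], None)] + pairs
--     return pairs
-- ===== Notes on version B (the rewrite author's own statement) =====
-- stated objective: alternative
-- what changed: Replaces the single Option-returning backtracking search by a two-phase algorithm: a memoized subset-feasibility oracle (dict keyed by the remaining-index tuple) decides solvability, and the pairing is then rebuilt by a greedy non-backtracking loop that pairs the first free team with the first oracle-approved opponent; memoization avoids re-solving repeated subproblems that A's backtracking re-explores.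
import Mathlib
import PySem

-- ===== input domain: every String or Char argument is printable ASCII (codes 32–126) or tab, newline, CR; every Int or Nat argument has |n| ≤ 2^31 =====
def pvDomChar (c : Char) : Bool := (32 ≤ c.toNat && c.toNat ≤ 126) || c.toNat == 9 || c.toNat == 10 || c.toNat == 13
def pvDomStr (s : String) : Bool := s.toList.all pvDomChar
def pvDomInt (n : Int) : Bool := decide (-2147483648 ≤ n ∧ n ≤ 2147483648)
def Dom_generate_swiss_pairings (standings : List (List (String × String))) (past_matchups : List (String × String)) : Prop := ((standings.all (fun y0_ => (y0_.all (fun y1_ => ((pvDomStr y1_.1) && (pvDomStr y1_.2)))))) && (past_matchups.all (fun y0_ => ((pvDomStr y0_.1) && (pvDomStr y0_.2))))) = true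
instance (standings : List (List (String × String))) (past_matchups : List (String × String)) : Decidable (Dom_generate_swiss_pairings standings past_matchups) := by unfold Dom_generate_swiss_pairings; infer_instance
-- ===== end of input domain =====

-- B replaces A's Option-returning backtracking search by a two-phase algorithm: a memoized
-- subset-feasibility oracle plus a greedy, non-backtracking reconstruction (objective:
-- alternative). Equivalence is about the RETURN value; neither program mutates its input.

-- ===== PORT A =====
-- shared helper of both Python sources: have_played (strings compared as char lists = Python's code-point order)
def pvClean (s : String) : String := PySem.Str.replace (PySem.Str.strip s) "\t" " "

def have_played (team1 team2 : String) (past_matchups : List (String × String)) : Bool :=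
  let clean1 := pvClean team1
  let clean2 := pvClean team2
  match PySem.List.sorted [clean1, clean2] (fun x => x.toList) false with
  | [a, b] => PySem.Set.contains past_matchups (a, b)   -- matchup in past_matchups
  | _ => false                                          -- unreachable: sorted 2-list has 2 elements

-- _find_pairing_without_repeats: backtracking, mutual with its `for j in unpaired[1:]` loop
mutual
def pvFindPairing (teams : List String) (past : List (String × String)) : List Nat → Option (List (String × String))
  | [] => some []
  | i :: rest => pvTryOpps teams past i rest rest
termination_by u => (u.length, u.length)
def pvTryOpps (teams : List String) (past : List (String × String)) (i : Nat) (rest : List Nat) : List Nat → Option (List (String × String))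
  | [] => none
  | j :: cands =>
    let team1 := teams.getD i ""    -- teams[i]: index always in range here
    let team2 := teams.getD j ""
    if have_played team1 team2 past then pvTryOpps teams past i rest cands
    else
      let restIndices := (i :: rest).filter (fun idx => !(idx == i || idx == j))
      match pvFindPairing teams past restIndices with
      | some ps => some ((team1, team2) :: ps)
      | none => pvTryOpps teams past i rest cands
termination_by cands => (rest.length + 1, cands.length)
decreasing_by
  · exact Prod.Lex.right _ (Nat.lt_succ_self _)
  · refine Prod.Lex.left _ _ ?_
    simp only [List.filter_cons, BEq.rfl, Bool.true_or, Bool.not_true]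
    exact Nat.lt_succ_of_le (List.length_filter_le _ _)
  · exact Prod.Lex.right _ (Nat.lt_succ_self _)
end

def generate_swiss_pairings (standings : List (List (String × String))) (past_matchups : List (String × String)) : List (Option String × Option String) :=
  let teams := standings.map (fun team => pvClean ((PySem.Dict.get? (PySem.Dict.mk team) "TeamName").getD ""))  -- KeyError (missing 'TeamName') excluded by Pre_
  let n := teams.length
  if n % 2 = 1 then
    let byeTeam := (PySem.List.pyGet? teams (-1)).getD ""   -- teams[-1], n ≥ 1 here
    match pvFindPairing teams past_matchups (List.range (n - 1)) with
    | none => []                                            -- Python: raise ValueError (excluded by Pre_)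
    | some pairings => (some byeTeam, none) :: pairings.map (fun p => (some p.1, some p.2))
  else
    match pvFindPairing teams past_matchups (List.range n) with
    | none => []                                            -- Python: raise ValueError (excluded by Pre_)
    | some pairings => pairings.map (fun p => (some p.1, some p.2))

-- ===== PORT B =====
-- solvable(unpaired): memoized feasibility oracle; the dict `memo` is threaded through
mutual
def pvSolvable (teams : List String) (past : List (String × String)) :
    List Nat → PySem.Dict (List Nat) Bool → Bool × PySem.Dict (List Nat) Bool
  | [], memo => (true, memo)
  | i :: rest, memo =>
    match PySem.Dict.get? memo (i :: rest) with
    | some b => (b, memo)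
    | none =>
      let (result, memo') := pvSolvLoop teams past i rest rest memo
      (result, PySem.Dict.insert memo' (i :: rest) result)
termination_by u => (u.length, u.length)
def pvSolvLoop (teams : List String) (past : List (String × String)) (i : Nat) (rest : List Nat) :
    List Nat → PySem.Dict (List Nat) Bool → Bool × PySem.Dict (List Nat) Bool
  | [], memo => (false, memo)
  | j :: cs, memo =>
    if have_played (teams.getD i "") (teams.getD j "") past then
      pvSolvLoop teams past i rest cs memo
    else
      let (b, memo') := pvSolvable teams past (rest.filter (fun k => k != j)) memo
      if b then (true, memo')
      else pvSolvLoop teams past i rest cs memo'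
termination_by cs => (rest.length + 1, cs.length)
decreasing_by
  · exact Prod.Lex.right _ (Nat.lt_succ_self _)
  · exact Prod.Lex.left _ _ (Nat.lt_succ_of_le (List.length_filter_le _ _))
  · exact Prod.Lex.right _ (Nat.lt_succ_self _)
end

-- the `for j in rest: … break` scan of the greedy loop
def pvPick (teams : List String) (past : List (String × String)) (i : Nat) (rest : List Nat) :
    List Nat → PySem.Dict (List Nat) Bool → Option Nat × PySem.Dict (List Nat) Bool
  | [], memo => (none, memo)     -- unreachable under the solvability guard
  | j :: cs, memo =>
    if have_played (teams.getD i "") (teams.getD j "") past then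
      pvPick teams past i rest cs memo
    else
      let (b, memo') := pvSolvable teams past (rest.filter (fun k => k != j)) memo
      if b then (some j, memo')
      else pvPick teams past i rest cs memo'

-- the `while remaining:` greedy reconstruction
def pvGreedy (teams : List String) (past : List (String × String)) :
    List Nat → PySem.Dict (List Nat) Bool → List (String × String)
  | [], _ => []
  | i :: rest, memo =>
    match pvPick teams past i rest rest memo with
    | (none, _) => []   -- unreachable: the guard guarantees a valid opponent exists
    | (some j, memo') =>
      (teams.getD i "", teams.getD j "") :: pvGreedy teams past (rest.filter (fun k => k != j)) memo'
termination_by u => u.length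
decreasing_by
  simp only [List.length_unattach]
  exact Nat.lt_succ_of_le (le_trans (List.length_filter_le _ _) (by simp))

def generate_swiss_pairings_alt (standings : List (List (String × String))) (past_matchups : List (String × String)) : List (Option String × Option String) :=
  let teams := standings.map (fun team => pvClean ((PySem.Dict.get? (PySem.Dict.mk team) "TeamName").getD ""))
  let n := teams.length
  let m := n - n % 2
  let (s, memo) := pvSolvable teams past_matchups (List.range m) PySem.Dict.empty
  if !s then []                                             -- Python: raise ValueError (excluded by Pre_)
  else
    let pairs := (pvGreedy teams past_matchups (List.range m) memo).map (fun p => (some p.1, some p.2))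
    if n % 2 = 1 then (some ((PySem.List.pyGet? teams (-1)).getD ""), none) :: pairs else pairs

-- ===== PRECONDITION & SPEC =====
-- Pre_ needs "a repeat-free perfect matching of the index set exists" — matching existence has no
-- bounds/shape closed form, so it is stated as the symmetric partition predicate below: pair off ANY
-- two compatible indices and recurse (order-independent; NOT either port's search, which fixes the
-- first index and scans in rank order). Fuel = |s| (two indices leave per step) keeps the recursion
-- structural so that `decide` can evaluate it.
def pvCanPair (teams : List String) (past : List (String × String)) : Nat → List Nat → Bool
  | 0, s => s.isEmpty
  | fuel + 1, s =>
    s.isEmpty || s.any (fun i => s.any (fun j =>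
      decide (i ≠ j) && !have_played (teams.getD i "") (teams.getD j "") past &&
        pvCanPair teams past fuel ((s.erase i).erase j)))

-- Pre_ excludes exactly the inputs where Python A raises: a standings row without a 'TeamName'
-- key (KeyError), and inputs where no complete repeat-free pairing of the non-bye teams exists
-- (ValueError).
def Pre_generate_swiss_pairings (standings : List (List (String × String))) (past_matchups : List (String × String)) : Prop :=
  (∀ team ∈ standings, (PySem.Dict.get? (PySem.Dict.mk team) "TeamName").isSome = true) ∧
  (let teams := standings.map (fun team => pvClean ((PySem.Dict.get? (PySem.Dict.mk team) "TeamName").getD ""));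
   let toPair := List.range (teams.length - teams.length % 2);
   pvCanPair teams past_matchups toPair.length toPair = true)
instance (standings : List (List (String × String))) (past_matchups : List (String × String)) : Decidable (Pre_generate_swiss_pairings standings past_matchups) := by unfold Pre_generate_swiss_pairings; infer_instance

def pvWitness_generate_swiss_pairings : (List (List (String × String))) × (List (String × String)) :=
  ([[("TeamName", "Alpha")], [("TeamName", "Beta")], [("TeamName", "Gamma")]], [("Beta", "Gamma")])

def Spec_generate_swiss_pairings (standings : List (List (String × String))) (past_matchups : List (String × String)) (out : List (Option String × Option String)) : Prop := out = generate_swiss_pairings_alt standings past_matchups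
instance (standings : List (List (String × String))) (past_matchups : List (String × String)) (out : List (Option String × Option String)) : Decidable (Spec_generate_swiss_pairings standings past_matchups out) := by unfold Spec_generate_swiss_pairings; infer_instance

-- ===== CLAIM (what is proved, stated in full; the proofs are below) =====
def Claim_equal_generate_swiss_pairings : Prop := ∀ (standings : List (List (String × String))) (past_matchups : List (String × String)), Dom_generate_swiss_pairings standings past_matchups → Pre_generate_swiss_pairings standings past_matchups → Spec_generate_swiss_pairings standings past_matchups (generate_swiss_pairings standings past_matchups)

-- ===== LEMMAS AND PROOFS =====

def pvSpec (teams : List String) (past : List (String × String)) : List Nat → Bool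
  | [] => true
  | i :: rest =>
    rest.attach.any (fun j =>
      !have_played (teams.getD i "") (teams.getD j.1 "") past &&
        pvSpec teams past (rest.filter (fun k => k != j.1)))
termination_by u => u.length
decreasing_by
  simp only [List.length_unattach]
  exact Nat.lt_succ_of_le (le_trans (List.length_filter_le _ _) (by simp))

def pvMemoOK (teams : List String) (past : List (String × String)) (memo : PySem.Dict (List Nat) Bool) : Prop :=
  ∀ k b, PySem.Dict.get? memo k = some b → b = pvSpec teams past k

lemma solvLoop_cons_played (teams : List String) (past : List (String × String)) (i j : Nat)
    (rest cs : List Nat) (memo : PySem.Dict (List Nat) Bool)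
    (hp : have_played (teams.getD i "") (teams.getD j "") past = true) :
    pvSolvLoop teams past i rest (j :: cs) memo = pvSolvLoop teams past i rest cs memo := by
  rw [pvSolvLoop, if_pos hp]

lemma solvLoop_cons_new (teams : List String) (past : List (String × String)) (i j : Nat)
    (rest cs : List Nat) (memo : PySem.Dict (List Nat) Bool)
    (hp : ¬ have_played (teams.getD i "") (teams.getD j "") past = true) :
    pvSolvLoop teams past i rest (j :: cs) memo =
      (if (pvSolvable teams past (rest.filter (fun k => k != j)) memo).1
       then (true, (pvSolvable teams past (rest.filter (fun k => k != j)) memo).2)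
       else pvSolvLoop teams past i rest cs (pvSolvable teams past (rest.filter (fun k => k != j)) memo).2) := by
  rw [pvSolvLoop, if_neg hp]


lemma solvable_cons_miss (teams : List String) (past : List (String × String)) (i : Nat)
    (rest : List Nat) (memo : PySem.Dict (List Nat) Bool)
    (hg : PySem.Dict.get? memo (i :: rest) = none) :
    pvSolvable teams past (i :: rest) memo =
      ((pvSolvLoop teams past i rest rest memo).1,
       PySem.Dict.insert (pvSolvLoop teams past i rest rest memo).2 (i :: rest)
         (pvSolvLoop teams past i rest rest memo).1) := by
  rw [pvSolvable, hg]


lemma solvable_cons_hit (teams : List String) (past : List (String × String)) (i : Nat)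
    (rest : List Nat) (memo : PySem.Dict (List Nat) Bool) (b : Bool)
    (hg : PySem.Dict.get? memo (i :: rest) = some b) :
    pvSolvable teams past (i :: rest) memo = (b, memo) := by
  rw [pvSolvable, hg]

lemma pv_spec_cons (teams : List String) (past : List (String × String)) (i : Nat) (rest : List Nat) :
    pvSpec teams past (i :: rest) =
      rest.any (fun j => !have_played (teams.getD i "") (teams.getD j "") past &&
        pvSpec teams past (rest.filter (fun k => k != j))) := by
  rw [pvSpec]
  conv_rhs => rw [← List.attach_map_subtype_val rest, List.any_map]
  simp [Function.comp_def]

lemma pv_solvable_correct (teams : List String) (past : List (String × String)) :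
    ∀ (n : Nat) (u : List Nat) (memo : PySem.Dict (List Nat) Bool), u.length ≤ n →
      pvMemoOK teams past memo →
      (pvSolvable teams past u memo).1 = pvSpec teams past u ∧
        pvMemoOK teams past (pvSolvable teams past u memo).2 := by
  intro n
  induction n with
  | zero =>
    intro u memo hu hm
    have : u = [] := List.eq_nil_of_length_eq_zero (Nat.le_zero.mp hu)
    subst this
    rw [pvSolvable]
    exact ⟨by rw [pvSpec], hm⟩
  | succ n ih =>
    intro u memo hu hm
    match u with
    | [] => rw [pvSolvable]; exact ⟨by rw [pvSpec], hm⟩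
    | i :: rest =>
      have hlen : rest.length ≤ n := Nat.lt_succ_iff.mp (Nat.lt_of_lt_of_le (Nat.lt_succ_self _) hu)
      have hloop : ∀ (cs : List Nat) (memo : PySem.Dict (List Nat) Bool), pvMemoOK teams past memo →
          (pvSolvLoop teams past i rest cs memo).1 =
            cs.any (fun j => !have_played (teams.getD i "") (teams.getD j "") past &&
              pvSpec teams past (rest.filter (fun k => k != j))) ∧
            pvMemoOK teams past (pvSolvLoop teams past i rest cs memo).2 := by
        intro cs
        induction cs with
        | nil => intro memo hm; rw [pvSolvLoop]; exact ⟨rfl, hm⟩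
        | cons j cs ihc =>
          intro memo hm
          by_cases hp : have_played (teams.getD i "") (teams.getD j "") past
          · rw [solvLoop_cons_played teams past i j rest cs memo hp]
            obtain ⟨hv, hm'⟩ := ihc memo hm
            refine ⟨?_, hm'⟩
            rw [hv]
            simp only [List.any_cons, hp, Bool.not_true, Bool.false_and, Bool.false_or]
          · have hfl : (rest.filter (fun k => k != j)).length ≤ n :=
              Nat.le_trans (List.length_filter_le _ _) hlen
            obtain ⟨hv, hm'⟩ := ih (rest.filter (fun k => k != j)) memo hfl hm
            rw [solvLoop_cons_new teams past i j rest cs memo hp]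
            have hpf : have_played (teams.getD i "") (teams.getD j "") past = false := by
              simpa using hp
            by_cases hb : (pvSolvable teams past (rest.filter (fun k => k != j)) memo).1 = true
            · rw [if_pos hb]
              have hsp : pvSpec teams past (rest.filter (fun k => k != j)) = true := hv ▸ hb
              refine ⟨?_, hm'⟩
              simp only [List.any_cons, hpf, Bool.not_false, Bool.true_and, hsp, Bool.true_or]
            · rw [if_neg hb]
              have hsp : pvSpec teams past (rest.filter (fun k => k != j)) = false :=
                hv ▸ Bool.eq_false_iff.mpr hb
              obtain ⟨hv2, hm2⟩ := ihc _ hm'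
              refine ⟨?_, hm2⟩
              rw [hv2]
              simp only [List.any_cons, hpf, Bool.not_false, Bool.true_and, hsp, Bool.false_or]
      obtain ⟨hv, hm'⟩ := hloop rest memo hm
      match hg : PySem.Dict.get? memo (i :: rest) with
      | some b =>
        rw [solvable_cons_hit teams past i rest memo b hg]
        exact ⟨hm _ _ hg, hm⟩
      | none =>
        rw [solvable_cons_miss teams past i rest memo hg]
        refine ⟨by rw [pv_spec_cons]; exact hv, ?_⟩
        intro k b hk
        rcases eq_or_ne k (i :: rest) with rfl | hne
        · rw [PySem.Dict.get?_insert_self] at hk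
          cases hk
          rw [pv_spec_cons]
          exact hv
        · rw [PySem.Dict.get?_insert_of_ne _ _ hne] at hk
          exact hm' _ _ hk

lemma pick_cons_played (teams : List String) (past : List (String × String)) (i j : Nat)
    (rest cs : List Nat) (memo : PySem.Dict (List Nat) Bool)
    (hp : have_played (teams.getD i "") (teams.getD j "") past = true) :
    pvPick teams past i rest (j :: cs) memo = pvPick teams past i rest cs memo := by
  rw [pvPick, if_pos hp]

lemma pick_cons_new (teams : List String) (past : List (String × String)) (i j : Nat)
    (rest cs : List Nat) (memo : PySem.Dict (List Nat) Bool)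
    (hp : ¬ have_played (teams.getD i "") (teams.getD j "") past = true) :
    pvPick teams past i rest (j :: cs) memo =
      (if (pvSolvable teams past (rest.filter (fun k => k != j)) memo).1
       then (some j, (pvSolvable teams past (rest.filter (fun k => k != j)) memo).2)
       else pvPick teams past i rest cs (pvSolvable teams past (rest.filter (fun k => k != j)) memo).2) := by
  rw [pvPick, if_neg hp]

set_option maxHeartbeats 1000000 in
lemma pv_pick_correct (teams : List String) (past : List (String × String)) (i : Nat) (rest : List Nat) :
    ∀ (cs : List Nat) (memo : PySem.Dict (List Nat) Bool), pvMemoOK teams past memo →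
      (pvPick teams past i rest cs memo).1 =
        cs.find? (fun j => !have_played (teams.getD i "") (teams.getD j "") past &&
          pvSpec teams past (rest.filter (fun k => k != j))) ∧
        pvMemoOK teams past (pvPick teams past i rest cs memo).2 := by
  intro cs
  induction cs with
  | nil => intro memo hm; rw [pvPick]; exact ⟨rfl, hm⟩
  | cons j cs ihc =>
    intro memo hm
    by_cases hp : have_played (teams.getD i "") (teams.getD j "") past
    · have hfind : List.find? (fun j => !have_played (teams.getD i "") (teams.getD j "") past &&
          pvSpec teams past (rest.filter (fun k => k != j))) (j :: cs) =
          List.find? (fun j => !have_played (teams.getD i "") (teams.getD j "") past &&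
            pvSpec teams past (rest.filter (fun k => k != j))) cs :=
        List.find?_cons_of_neg (l := cs) (by simp only [hp, Bool.not_true, Bool.false_and]; exact Bool.false_ne_true)
      rw [pick_cons_played teams past i j rest cs memo hp, hfind]
      exact ihc memo hm
    · have hpf : have_played (teams.getD i "") (teams.getD j "") past = false :=
        Bool.eq_false_iff.mpr hp
      obtain ⟨hv, hm'⟩ := pv_solvable_correct teams past (rest.filter (fun k => k != j)).length
        (rest.filter (fun k => k != j)) memo le_rfl hm
      rw [pick_cons_new teams past i j rest cs memo hp]
      by_cases hb : (pvSolvable teams past (rest.filter (fun k => k != j)) memo).1 = true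
      · rw [if_pos hb]
        have hsp : pvSpec teams past (rest.filter (fun k => k != j)) = true := hv ▸ hb
        have hfind : List.find? (fun j => !have_played (teams.getD i "") (teams.getD j "") past &&
            pvSpec teams past (rest.filter (fun k => k != j))) (j :: cs) = some j :=
          List.find?_cons_of_pos (l := cs) (by simp only [hpf, hsp, Bool.not_false, Bool.true_and])
        rw [hfind]
        exact ⟨rfl, hm'⟩
      · rw [if_neg hb]
        have hsp : pvSpec teams past (rest.filter (fun k => k != j)) = false :=
          hv ▸ Bool.eq_false_iff.mpr hb
        have hfind : List.find? (fun j => !have_played (teams.getD i "") (teams.getD j "") past &&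
            pvSpec teams past (rest.filter (fun k => k != j))) (j :: cs) =
            List.find? (fun j => !have_played (teams.getD i "") (teams.getD j "") past &&
              pvSpec teams past (rest.filter (fun k => k != j))) cs :=
          List.find?_cons_of_neg (l := cs) (by simp only [hsp, Bool.and_false]; exact Bool.false_ne_true)
        rw [hfind]
        exact ihc _ hm'

lemma greedy_cons (teams : List String) (past : List (String × String)) (i : Nat)
    (rest : List Nat) (memo : PySem.Dict (List Nat) Bool) (j : Nat)
    (memo' : PySem.Dict (List Nat) Bool)
    (hp : pvPick teams past i rest rest memo = (some j, memo')) :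
    pvGreedy teams past (i :: rest) memo =
      (teams.getD i "", teams.getD j "") ::
        pvGreedy teams past (rest.filter (fun k => k != j)) memo' := by
  rw [pvGreedy, hp]

lemma pv_filter_eq (i j : Nat) (rest : List Nat) (hi : i ∉ rest) :
    (i :: rest).filter (fun idx => !(idx == i || idx == j)) = rest.filter (fun idx => idx != j) := by
  simp only [List.filter_cons, BEq.rfl, Bool.true_or, Bool.not_true]
  refine List.filter_congr (fun x hx => ?_)
  have : x ≠ i := fun h => hi (h ▸ hx)
  simp [this, bne]

lemma tryOpps_cons_played (teams : List String) (past : List (String × String)) (i j : Nat)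
    (rest cands : List Nat)
    (hp : have_played (teams.getD i "") (teams.getD j "") past = true) :
    pvTryOpps teams past i rest (j :: cands) = pvTryOpps teams past i rest cands := by
  rw [pvTryOpps, if_pos hp]

lemma tryOpps_cons_new (teams : List String) (past : List (String × String)) (i j : Nat)
    (rest cands : List Nat)
    (hp : ¬ have_played (teams.getD i "") (teams.getD j "") past = true) :
    pvTryOpps teams past i rest (j :: cands) =
      (match pvFindPairing teams past ((i :: rest).filter (fun idx => !(idx == i || idx == j))) with
       | some ps => some ((teams.getD i "", teams.getD j "") :: ps)
       | none => pvTryOpps teams past i rest cands) := by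
  rw [pvTryOpps, if_neg hp]

lemma pv_find_eq_greedy (teams : List String) (past : List (String × String)) :
    ∀ (n : Nat) (u : List Nat), u.length ≤ n → u.Nodup →
      (pvSpec teams past u = false → pvFindPairing teams past u = none) ∧
      (pvSpec teams past u = true → ∀ memo, pvMemoOK teams past memo →
        pvFindPairing teams past u = some (pvGreedy teams past u memo)) := by
  intro n
  induction n with
  | zero =>
    intro u hu _
    have : u = [] := List.eq_nil_of_length_eq_zero (Nat.le_zero.mp hu)
    subst this
    constructor
    · intro h; rw [pvSpec] at h; exact absurd h (by simp)
    · intro _ memo _; rw [pvFindPairing, pvGreedy]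
  | succ n ih =>
    intro u hu hnd
    match u with
    | [] =>
      constructor
      · intro h; rw [pvSpec] at h; exact absurd h (by simp)
      · intro _ memo _; rw [pvFindPairing, pvGreedy]
    | i :: rest =>
      have hi : i ∉ rest := (List.nodup_cons.mp hnd).1
      have hrest : rest.Nodup := (List.nodup_cons.mp hnd).2
      have hlen : rest.length ≤ n := Nat.lt_succ_iff.mp (Nat.lt_of_lt_of_le (Nat.lt_succ_self _) hu)
      -- inner scan lemma over the candidate list
      have inner : ∀ cands : List Nat,
          (List.find? (fun j => !have_played (teams.getD i "") (teams.getD j "") past &&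
              pvSpec teams past (rest.filter (fun k => k != j))) cands = none →
            pvTryOpps teams past i rest cands = none) ∧
          (∀ j ps, List.find? (fun j => !have_played (teams.getD i "") (teams.getD j "") past &&
              pvSpec teams past (rest.filter (fun k => k != j))) cands = some j →
            pvFindPairing teams past (rest.filter (fun k => k != j)) = some ps →
            pvTryOpps teams past i rest cands = some ((teams.getD i "", teams.getD j "") :: ps)) := by
        intro cands
        induction cands with
        | nil =>
          refine ⟨fun _ => by rw [pvTryOpps], fun j ps h _ => by simp at h⟩
        | cons j' cs ihc =>
          have hfl : (rest.filter (fun k => k != j')).length ≤ n :=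
            Nat.le_trans (List.length_filter_le _ _) hlen
          have hfnd : (rest.filter (fun k => k != j')).Nodup := hrest.filter _
          by_cases hp : have_played (teams.getD i "") (teams.getD j' "") past
          · have hf : (!have_played (teams.getD i "") (teams.getD j' "") past &&
                pvSpec teams past (rest.filter (fun k => k != j'))) = false := by
              simp only [hp, Bool.not_true, Bool.false_and]
            constructor
            · intro hfind
              rw [List.find?_cons_of_neg (l := cs) (by simp only [hf]; exact Bool.false_ne_true)] at hfind
              rw [tryOpps_cons_played teams past i j' rest cs hp]
              exact ihc.1 hfind
            · intro j ps hfind hps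
              rw [List.find?_cons_of_neg (l := cs) (by simp only [hf]; exact Bool.false_ne_true)] at hfind
              rw [tryOpps_cons_played teams past i j' rest cs hp]
              exact ihc.2 j ps hfind hps
          · have hpf : have_played (teams.getD i "") (teams.getD j' "") past = false :=
              Bool.eq_false_iff.mpr hp
            rw [tryOpps_cons_new teams past i j' rest cs hp, pv_filter_eq i j' rest hi]
            by_cases hsp : pvSpec teams past (rest.filter (fun k => k != j')) = true
            · -- j' is valid: find? picks it
              have hf : (!have_played (teams.getD i "") (teams.getD j' "") past &&
                  pvSpec teams past (rest.filter (fun k => k != j'))) = true := by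
                simp only [hpf, hsp, Bool.not_false, Bool.true_and]
              have hfind1 : List.find? (fun j => !have_played (teams.getD i "") (teams.getD j "") past &&
                  pvSpec teams past (rest.filter (fun k => k != j))) (j' :: cs) = some j' :=
                List.find?_cons_of_pos (l := cs) hf
              constructor
              · intro hfind
                rw [hfind1] at hfind
                exact absurd hfind (by simp)
              · intro j ps hfind hps
                rw [hfind1] at hfind
                cases hfind
                rw [hps]
            · -- j' playable but infeasible: recursion fails, scan continues
              have hspf : pvSpec teams past (rest.filter (fun k => k != j')) = false :=
                Bool.eq_false_iff.mpr hsp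
              have hnone : pvFindPairing teams past (rest.filter (fun k => k != j')) = none :=
                (ih _ hfl hfnd).1 hspf
              have hf : (!have_played (teams.getD i "") (teams.getD j' "") past &&
                  pvSpec teams past (rest.filter (fun k => k != j'))) = false := by
                simp only [hspf, Bool.and_false]
              rw [hnone]
              constructor
              · intro hfind
                rw [List.find?_cons_of_neg (l := cs) (by simp only [hf]; exact Bool.false_ne_true)] at hfind
                exact ihc.1 hfind
              · intro j ps hfind hps
                rw [List.find?_cons_of_neg (l := cs) (by simp only [hf]; exact Bool.false_ne_true)] at hfind
                exact ihc.2 j ps hfind hps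
      rw [pvFindPairing]
      constructor
      · intro hspec
        rw [pv_spec_cons] at hspec
        refine (inner rest).1 (List.find?_eq_none.mpr ?_)
        intro x hx
        exact List.any_eq_false.mp hspec x hx
      · intro hspec memo hm
        rw [pv_spec_cons] at hspec
        cases hfind : List.find? (fun j => !have_played (teams.getD i "") (teams.getD j "") past &&
            pvSpec teams past (rest.filter (fun k => k != j))) rest with
        | none =>
          exfalso
          have : rest.any (fun j => !have_played (teams.getD i "") (teams.getD j "") past &&
              pvSpec teams past (rest.filter (fun k => k != j))) = false := by
            rw [List.any_eq_false]
            intro x hx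
            have := List.find?_eq_none.mp hfind x hx
            simpa using this
          rw [this] at hspec
          cases hspec
        | some j₀ =>
          have hfj := List.find?_some hfind
          have hsp : pvSpec teams past (rest.filter (fun k => k != j₀)) = true := by
            have h2 := hfj
            simp only [Bool.and_eq_true] at h2
            exact h2.2
          have hfl' : (rest.filter (fun k => k != j₀)).length ≤ n :=
            Nat.le_trans (List.length_filter_le _ _) hlen
          have hfnd' : (rest.filter (fun k => k != j₀)).Nodup := hrest.filter _
          obtain ⟨hpick1, hpickM⟩ := pv_pick_correct teams past i rest rest memo hm
          have h1 : (pvPick teams past i rest rest memo).1 = some j₀ := hpick1.trans hfind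
          have hpair : pvPick teams past i rest rest memo =
              (some j₀, (pvPick teams past i rest rest memo).2) := by
            conv_lhs => rw [show pvPick teams past i rest rest memo =
              ((pvPick teams past i rest rest memo).1,
               (pvPick teams past i rest rest memo).2) from rfl]
            rw [h1]
          rw [greedy_cons teams past i rest memo j₀ _ hpair]
          have hrec := (ih (rest.filter (fun k => k != j₀)) hfl' hfnd').2 hsp _ hpickM
          exact (inner rest).2 j₀ _ hfind hrec

lemma pv_main (standings : List (List (String × String))) (past_matchups : List (String × String)) :
    generate_swiss_pairings standings past_matchups = generate_swiss_pairings_alt standings past_matchups := by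
  unfold generate_swiss_pairings generate_swiss_pairings_alt
  dsimp only
  set teams := standings.map (fun team => pvClean ((PySem.Dict.get? (PySem.Dict.mk team) "TeamName").getD "")) with hteams
  set n := teams.length with hn
  set m := n - n % 2 with hm
  have hmemo0 : pvMemoOK teams past_matchups PySem.Dict.empty := by
    intro k b hk
    rw [PySem.Dict.get?_empty] at hk
    cases hk
  obtain ⟨hs, hsM⟩ := pv_solvable_correct teams past_matchups (List.range m).length (List.range m)
    PySem.Dict.empty le_rfl hmemo0
  have hpair : pvSolvable teams past_matchups (List.range m) PySem.Dict.empty =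
      ((pvSolvable teams past_matchups (List.range m) PySem.Dict.empty).1,
       (pvSolvable teams past_matchups (List.range m) PySem.Dict.empty).2) := rfl
  by_cases hsp : pvSpec teams past_matchups (List.range m) = true
  · have hfind := (pv_find_eq_greedy teams past_matchups (List.range m).length (List.range m)
      le_rfl List.nodup_range).2 hsp _ hsM
    rw [hpair, hs, hsp]
    by_cases hodd : n % 2 = 1
    · have hm1 : m = n - 1 := by omega
      rw [if_pos hodd]
      rw [hm1] at hfind
      rw [hfind]
      simp [hodd, hm1]
    · have hm0 : m = n := by omega
      rw [if_neg hodd]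
      rw [hm0] at hfind
      rw [hfind]
      simp [hodd, hm0]
  · have hspf : pvSpec teams past_matchups (List.range m) = false := Bool.eq_false_iff.mpr hsp
    have hfind := (pv_find_eq_greedy teams past_matchups (List.range m).length (List.range m)
      le_rfl List.nodup_range).1 hspf
    rw [hpair, hs, hspf]
    by_cases hodd : n % 2 = 1
    · have hm1 : m = n - 1 := by omega
      rw [if_pos hodd]
      rw [hm1] at hfind
      rw [hfind]
      simp
    · have hm0 : m = n := by omega
      rw [if_neg hodd]
      rw [hm0] at hfind
      rw [hfind]
      simp

-- ===== VERDICT (by name: the statement is the Claim_ definition above) =====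
theorem generate_swiss_pairings_spec : Claim_equal_generate_swiss_pairings := by
  intro standings past_matchups _ _
  exact pv_main standings past_matchups
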